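-- pv_equiv track=rewrite | github.com/UlissePalmi/argentina_report | report/signal_text.py | _split_flags
-- ===== SOURCE A (Python) =====
-- def _split_flags(flags: list[str]) -> tuple[list, list, list, list]:
--     critical, warnings, positives, notes = [], [], [], []
--     for f in flags:
--         if f.startswith("CRITICAL:"):
--             critical.append(f[len("CRITICAL:"):].strip())
--         elif f.startswith("WARNING:"):
--             warnings.append(f[len("WARNING:"):].strip())
--         elif f.startswith("POSITIVE:"):
--             positives.append(f[len("POSITIVE:"):].strip())
--         else:
--             notes.append(f.removeprefix("NOTE:").strip())
--     return critical, warnings, positives, notes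
-- ===== SOURCE B (Python) =====
-- def _split_flags(flags: list[str]) -> tuple[list, list, list, list]:
--     def peel(items, prefix):
--         hits, rest = [], []
--         for f in items:
--             (hits if f.startswith(prefix) else rest).append(f)
--         return [f[len(prefix):].strip() for f in hits], rest
--     critical, rest = peel(flags, "CRITICAL:")
--     warnings, rest = peel(rest, "WARNING:")
--     positives, rest = peel(rest, "POSITIVE:")
--     notes = [f.removeprefix("NOTE:").strip() for f in rest]
--     return critical, warnings, positives, notes
-- ===== Notes on version B (the rewrite author's own statement) =====
-- stated objective: alternative
-- what changed: Replaces A's single four-accumulator if/elif loop with a staged peeling pipeline: each prefix is partitioned off the shrinking residue of the previous stage, and the final residue becomes the notes.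
import Mathlib
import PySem

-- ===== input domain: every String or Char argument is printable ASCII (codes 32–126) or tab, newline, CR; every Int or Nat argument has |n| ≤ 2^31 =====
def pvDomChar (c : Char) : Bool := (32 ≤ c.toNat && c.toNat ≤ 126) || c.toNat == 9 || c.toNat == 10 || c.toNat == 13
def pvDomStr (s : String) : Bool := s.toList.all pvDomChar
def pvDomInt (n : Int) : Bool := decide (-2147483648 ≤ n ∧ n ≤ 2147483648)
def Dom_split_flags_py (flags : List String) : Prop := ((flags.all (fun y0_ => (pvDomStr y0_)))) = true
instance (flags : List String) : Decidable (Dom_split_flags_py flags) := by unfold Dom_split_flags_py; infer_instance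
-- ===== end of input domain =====

-- B replaces A's single four-accumulator if/elif loop with a staged peeling
-- pipeline: each pfx is partitioned off the residue of the previous stage
-- (alternative decomposition; same cost).

-- ===== PORT A =====
-- one loop iteration of A's for-loop (f.removepfx("NOTE:") ported by hand:
-- exactly 'slice from 5' when f starts with "NOTE:", else f — exact for removepfx)
def pvStepA (acc : List String × List String × List String × List String) (f : String) :
    List String × List String × List String × List String :=
  if PySem.Str.startswith f "CRITICAL:" then
    (acc.1 ++ [PySem.Str.strip (PySem.Str.slice f (some 9) none)], acc.2.1, acc.2.2.1, acc.2.2.2)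
  else if PySem.Str.startswith f "WARNING:" then
    (acc.1, acc.2.1 ++ [PySem.Str.strip (PySem.Str.slice f (some 8) none)], acc.2.2.1, acc.2.2.2)
  else if PySem.Str.startswith f "POSITIVE:" then
    (acc.1, acc.2.1, acc.2.2.1 ++ [PySem.Str.strip (PySem.Str.slice f (some 9) none)], acc.2.2.2)
  else
    (acc.1, acc.2.1, acc.2.2.1,
     acc.2.2.2 ++ [PySem.Str.strip
       (if PySem.Str.startswith f "NOTE:" then PySem.Str.slice f (some 5) none else f)])

def split_flags_py (flags : List String) : List String × List String × List String × List String :=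
  flags.foldl pvStepA ([], [], [], [])

-- ===== PORT B =====
-- B's helper peel: one loop splitting items into (hits, rest), then a map over hits
def pvPeelLoop (items : List String) (pfx : String) : List String × List String :=
  items.foldl
    (fun acc f => if PySem.Str.startswith f pfx then (acc.1 ++ [f], acc.2)
                  else (acc.1, acc.2 ++ [f]))
    ([], [])

def pvPeel (items : List String) (pfx : String) : List String × List String :=
  let hr := pvPeelLoop items pfx
  (hr.1.map (fun f => PySem.Str.strip (PySem.Str.slice f (some (PySem.Str.len pfx)) none)),
   hr.2)

def split_flags_py_alt (flags : List String) : List String × List String × List String × List String :=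
  let cr := pvPeel flags "CRITICAL:"
  let wr := pvPeel cr.2 "WARNING:"
  let pr := pvPeel wr.2 "POSITIVE:"
  (cr.1, wr.1, pr.1,
   pr.2.map (fun f => PySem.Str.strip
     (if PySem.Str.startswith f "NOTE:" then PySem.Str.slice f (some 5) none else f)))

-- ===== PRECONDITION & SPEC =====
def Spec_split_flags_py (flags : List String) (out : List String × List String × List String × List String) : Prop := out = split_flags_py_alt flags
instance (flags : List String) (out : List String × List String × List String × List String) : Decidable (Spec_split_flags_py flags out) := by unfold Spec_split_flags_py; infer_instance

-- ===== CLAIM (what is proved, stated in full; the proofs are below) =====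
def Claim_equal_split_flags_py : Prop := ∀ (flags : List String), Dom_split_flags_py flags → Spec_split_flags_py flags (split_flags_py flags)

-- ===== LEMMAS AND PROOFS =====

-- the filter/map form both implementations reduce to
def pvFiltForm (flags : List String) : List String × List String × List String × List String :=
  ((flags.filter (fun f => PySem.Str.startswith f "CRITICAL:")).map
     (fun f => PySem.Str.strip (PySem.Str.slice f (some 9) none)),
   (flags.filter (fun f => PySem.Str.startswith f "WARNING:")).map
     (fun f => PySem.Str.strip (PySem.Str.slice f (some 8) none)),
   (flags.filter (fun f => PySem.Str.startswith f "POSITIVE:")).map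
     (fun f => PySem.Str.strip (PySem.Str.slice f (some 9) none)),
   (flags.filter (fun f => !(PySem.Str.startswith f "CRITICAL:" ||
                             PySem.Str.startswith f "WARNING:" ||
                             PySem.Str.startswith f "POSITIVE:"))).map
     (fun f => PySem.Str.strip
       (if PySem.Str.startswith f "NOTE:" then PySem.Str.slice f (some 5) none else f)))

-- two prefixes differing in their first character cannot both start a string
lemma pvSwExcl {l ta tb : List Char} {ca cb : Char} (hne : ca ≠ cb)
    (h : PySem.Chars.startswith l (ca :: ta) = true) :
    PySem.Chars.startswith l (cb :: tb) = false := by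
  by_contra hb'
  rw [Bool.not_eq_false, PySem.Chars.startswith_iff] at hb'
  rw [PySem.Chars.startswith_iff] at h
  rcases h with ⟨t1, e1⟩; rcases hb' with ⟨t2, e2⟩
  rw [← e1] at e2
  simp only [List.cons_append, List.cons.injEq] at e2
  exact hne e2.1.symm

-- peel's split loop is filter / filter-not
lemma pvPeelLoop_eq (pfx : String) (items : List String) :
    pvPeelLoop items pfx =
      (items.filter (fun f => PySem.Str.startswith f pfx),
       items.filter (fun f => !PySem.Str.startswith f pfx)) := by
  suffices h : ∀ (hs rs : List String),
      items.foldl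
        (fun acc f => if PySem.Chars.startswith f.toList pfx.toList then (acc.1 ++ [f], acc.2)
                      else (acc.1, acc.2 ++ [f])) (hs, rs) =
      (hs ++ items.filter (fun f => PySem.Chars.startswith f.toList pfx.toList),
       rs ++ items.filter (fun f => !PySem.Chars.startswith f.toList pfx.toList)) by
    simpa [pvPeelLoop] using h [] []
  induction items with
  | nil => intro hs rs; simp
  | cons f rest ih =>
    intro hs rs
    by_cases hf : PySem.Chars.startswith f.toList pfx.toList = true
    · simp [hf, ih]
    · simp at hf; simp [hf, ih]

lemma pvAlt_eq_filtForm (flags : List String) :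
    split_flags_py_alt flags = pvFiltForm flags := by
  have h9 : PySem.Str.len "CRITICAL:" = (9 : Int) := by decide
  have h8 : PySem.Str.len "WARNING:" = (8 : Int) := by decide
  have h9p : PySem.Str.len "POSITIVE:" = (9 : Int) := by decide
  have hW : ∀ fl : List String,
      List.filter (fun f => PySem.Str.startswith f "WARNING:")
        (List.filter (fun f => !PySem.Str.startswith f "CRITICAL:") fl)
      = List.filter (fun f => PySem.Str.startswith f "WARNING:") fl := by
    intro fl
    rw [List.filter_filter]
    apply List.filter_congr
    intro f _
    by_cases h : PySem.Chars.startswith f.toList ['W','A','R','N','I','N','G',':'] = true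
    · have h2 : PySem.Chars.startswith f.toList ['C','R','I','T','I','C','A','L',':'] = false := pvSwExcl (by decide) h
      simp [h, h2]
    · simp at h; simp [h]
  have hP : ∀ fl : List String,
      List.filter (fun f => PySem.Str.startswith f "POSITIVE:")
        (List.filter (fun f => !PySem.Str.startswith f "WARNING:")
          (List.filter (fun f => !PySem.Str.startswith f "CRITICAL:") fl))
      = List.filter (fun f => PySem.Str.startswith f "POSITIVE:") fl := by
    intro fl
    rw [List.filter_filter, List.filter_filter]
    apply List.filter_congr
    intro f _
    by_cases h : PySem.Chars.startswith f.toList ['P','O','S','I','T','I','V','E',':'] = true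
    · have h2 : PySem.Chars.startswith f.toList ['C','R','I','T','I','C','A','L',':'] = false := pvSwExcl (by decide) h
      have h3 : PySem.Chars.startswith f.toList ['W','A','R','N','I','N','G',':'] = false := pvSwExcl (by decide) h
      simp [h, h2, h3]
    · simp at h; simp [h]
  have hN : ∀ fl : List String,
      List.filter (fun f => !PySem.Str.startswith f "POSITIVE:")
        (List.filter (fun f => !PySem.Str.startswith f "WARNING:")
          (List.filter (fun f => !PySem.Str.startswith f "CRITICAL:") fl))
      = List.filter (fun f => !(PySem.Str.startswith f "CRITICAL:" ||
                                PySem.Str.startswith f "WARNING:" ||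
                                PySem.Str.startswith f "POSITIVE:")) fl := by
    intro fl
    rw [List.filter_filter, List.filter_filter]
    apply List.filter_congr
    intro f _
    by_cases hc : PySem.Chars.startswith f.toList ['C','R','I','T','I','C','A','L',':'] = true <;>
      by_cases hw : PySem.Chars.startswith f.toList ['W','A','R','N','I','N','G',':'] = true <;>
        by_cases hp : PySem.Chars.startswith f.toList ['P','O','S','I','T','I','V','E',':'] = true <;>
          simp [hc, hw, hp]
  simp only [split_flags_py_alt, pvPeel, pvPeelLoop_eq, h9, h8, h9p, hW, hP, hN, pvFiltForm]

lemma pvFoldA (flags : List String) :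
    ∀ (c w p n : List String),
      flags.foldl pvStepA (c, w, p, n) =
        (c ++ (pvFiltForm flags).1,
         w ++ (pvFiltForm flags).2.1,
         p ++ (pvFiltForm flags).2.2.1,
         n ++ (pvFiltForm flags).2.2.2) := by
  induction flags with
  | nil => intro c w p n; simp [pvFiltForm]
  | cons f rest ih =>
    intro c w p n
    by_cases hc : PySem.Chars.startswith f.toList ['C','R','I','T','I','C','A','L',':'] = true
    · have hw : PySem.Chars.startswith f.toList ['W','A','R','N','I','N','G',':'] = false := pvSwExcl (by decide) hc
      have hp : PySem.Chars.startswith f.toList ['P','O','S','I','T','I','V','E',':'] = false := pvSwExcl (by decide) hc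
      simp [List.foldl_cons, pvStepA, pvFiltForm, hc, hw, hp, ih]
    · simp at hc
      by_cases hw : PySem.Chars.startswith f.toList ['W','A','R','N','I','N','G',':'] = true
      · have hp : PySem.Chars.startswith f.toList ['P','O','S','I','T','I','V','E',':'] = false := pvSwExcl (by decide) hw
        simp [List.foldl_cons, pvStepA, pvFiltForm, hc, hw, hp, ih]
      · simp at hw
        by_cases hp : PySem.Chars.startswith f.toList ['P','O','S','I','T','I','V','E',':'] = true
        all_goals simp at hp
        all_goals simp [List.foldl_cons, pvStepA, pvFiltForm, hc, hw, hp, ih]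

-- ===== VERDICT (by name: the statement is the Claim_ definition above) =====
theorem split_flags_py_spec : Claim_equal_split_flags_py := by
  intro flags _
  unfold Spec_split_flags_py split_flags_py
  rw [pvFoldA flags [] [] [] [], pvAlt_eq_filtForm]
  simp
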